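-- pv_equiv track=rewrite | github.com/bss9395/bss9395.github.io | _en/Computer/Operating_System/Python_Programming/Py_Factory.py | function
-- ===== SOURCE A (Python) =====
-- def function(data, chose):
--     def square(numb):
--         return numb * numb
--
--     def factorial(numb):
--         result = 1
--         for i in range(2, numb + 1):
--             result *= i
--         return result
--
--     func = square
--     if chose == "square":
--         func = square
--     elif chose == "factorial":
--         func = factorial
--
--     result = list()
--     for datum in data:
--         result.append(func(datum))
--     return result
-- ===== SOURCE B (Python) =====
-- def function(data, chose):
--     def square(numb):
--         return numb * numb
--
--     def prod_range(lo, hi):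
--         # product of the integers lo..hi (inclusive), by balanced splitting
--         if lo > hi:
--             return 1
--         if lo == hi:
--             return lo
--         mid = (lo + hi) // 2
--         return prod_range(lo, mid) * prod_range(mid + 1, hi)
--
--     def factorial(numb):
--         return prod_range(2, numb)
--
--     func = factorial if chose == "factorial" else square
--     return [func(datum) for datum in data]
-- ===== Notes on version B (the rewrite author's own statement) =====
-- stated objective: alternative
-- what changed: factorial is computed as a balanced divide-and-conquer product of the range 2..n instead of a sequential left-to-right accumulation, and the output list is built by a comprehension instead of append in a loop
import Mathlib
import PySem

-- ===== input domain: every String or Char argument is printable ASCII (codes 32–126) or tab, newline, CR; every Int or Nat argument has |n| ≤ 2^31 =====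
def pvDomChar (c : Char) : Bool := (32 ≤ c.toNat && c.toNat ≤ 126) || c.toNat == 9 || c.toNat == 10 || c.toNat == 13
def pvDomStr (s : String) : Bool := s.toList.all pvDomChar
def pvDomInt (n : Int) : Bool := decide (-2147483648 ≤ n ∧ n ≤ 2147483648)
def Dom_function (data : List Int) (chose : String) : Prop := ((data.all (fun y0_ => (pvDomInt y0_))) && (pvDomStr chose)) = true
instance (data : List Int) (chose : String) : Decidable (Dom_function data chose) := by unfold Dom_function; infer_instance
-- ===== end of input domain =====

-- B computes factorial as a balanced divide-and-conquer product of 2..n instead of A's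
-- sequential accumulation, and builds the output by map; same return value everywhere.

-- ===== PORT A =====
def pvSquareA (numb : Int) : Int := numb * numb

def pvFactorialA (numb : Int) : Int :=
  (PySem.List.pyRange 2 (numb + 1) 1).foldl (fun result i => result * i) 1

def function (data : List Int) (chose : String) : List Int :=
  let func := if chose = "square" then pvSquareA
              else if chose = "factorial" then pvFactorialA
              else pvSquareA
  data.foldl (fun result datum => result ++ [func datum]) []

-- ===== PORT B =====
def pvSquareB (numb : Int) : Int := numb * numb

-- Source B's prod_range, recursive on (lo, hi); the Nat fuel only makes the same
-- recursion structural (fuel = (hi - lo).toNat + 1 always suffices).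
def pvProdRange : Nat → Int → Int → Int
  | 0, _, _ => 1
  | fuel + 1, lo, hi =>
    if lo > hi then 1
    else if lo = hi then lo
    else
      let mid := PySem.Int.floordiv (lo + hi) 2
      pvProdRange fuel lo mid * pvProdRange fuel (mid + 1) hi

def pvFactorialB (numb : Int) : Int := pvProdRange ((numb - 2).toNat + 1) 2 numb

def function_alt (data : List Int) (chose : String) : List Int :=
  let func := if chose = "factorial" then pvFactorialB else pvSquareB
  data.map func

-- ===== PRECONDITION & SPEC =====
def Spec_function (data : List Int) (chose : String) (out : List Int) : Prop := out = function_alt data chose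
instance (data : List Int) (chose : String) (out : List Int) : Decidable (Spec_function data chose out) := by unfold Spec_function; infer_instance

-- ===== CLAIM (what is proved, stated in full; the proofs are below) =====
def Claim_equal_function : Prop := ∀ (data : List Int) (chose : String), Dom_function data chose → Spec_function data chose (function data chose)

-- ===== LEMMAS AND PROOFS =====

-- with enough fuel, the balanced product of lo..hi is the product of the Python range lo..hi+1
theorem pvProdRange_eq_prod (fuel : Nat) : ∀ (lo hi : Int), (hi - lo).toNat < fuel →
    pvProdRange fuel lo hi = (PySem.List.pyRange lo (hi + 1) 1).prod := by
  induction fuel with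
  | zero => intro lo hi hn; omega
  | succ n ih =>
    intro lo hi hn
    simp only [pvProdRange]
    by_cases h1 : lo > hi
    · rw [if_pos h1, PySem.List.pyRange_one_eq_nil (by omega)]; simp
    · rw [if_neg h1]
      by_cases h2 : lo = hi
      · subst h2
        rw [if_pos rfl, PySem.List.pyRange_one_cons (by omega),
          PySem.List.pyRange_one_eq_nil (by omega)]
        simp
      · rw [if_neg h2]
        have hme : PySem.Int.floordiv (lo + hi) 2 = (lo + hi) / 2 :=
          PySem.Int.floordiv_eq_ediv_of_pos (by omega)
        show pvProdRange n lo (PySem.Int.floordiv (lo + hi) 2) *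
            pvProdRange n (PySem.Int.floordiv (lo + hi) 2 + 1) hi = _
        rw [PySem.List.pyRange_one_append lo (PySem.Int.floordiv (lo + hi) 2 + 1) (hi + 1)
            (by omega) (by omega), List.prod_append,
          ih lo (PySem.Int.floordiv (lo + hi) 2) (by omega),
          ih (PySem.Int.floordiv (lo + hi) 2 + 1) hi (by omega)]

-- A's factorial loop equals B's balanced product
theorem pvFactorial_eq (numb : Int) : pvFactorialA numb = pvFactorialB numb := by
  rw [pvFactorialA, pvFactorialB,
    pvProdRange_eq_prod ((numb - 2).toNat + 1) 2 numb (by omega), List.prod_eq_foldl]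

-- A's append-loop builds the map of the chosen function
theorem function_eq_map (data : List Int) (f : Int → Int) :
    data.foldl (fun result datum => result ++ [f datum]) [] = data.map f := by
  simpa using PySem.List.foldl_append_singleton_eq_map f data []

-- ===== VERDICT (by name: the statement is the Claim_ definition above) =====
theorem function_spec : Claim_equal_function := by
  intro data chose _
  unfold Spec_function function function_alt
  rw [function_eq_map]
  apply List.map_congr_left
  intro d _
  by_cases hs : chose = "square" <;> by_cases hf : chose = "factorial" <;>
    simp [hs, hf, pvSquareA, pvSquareB, pvFactorial_eq]
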